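-- pv_equiv track=rewrite | github.com/jhn153228/baekjoon_step | PROGRAMMERS/co_te.py | solution
-- ===== SOURCE A (Python) =====
-- def solution(players, m, k):
--     answer = 0
--     servers = []
--     for time, player in enumerate(players):
--         need_server = player // m
--         servers = [s for s in servers if s["delete_time"] != time]
--
--         use_server_cnt = sum(s["create_cnt"] for s in servers)
--
--         if use_server_cnt < need_server:
--             create_cnt = need_server - use_server_cnt
--             answer += create_cnt
--             servers.append({'delete_time': time + k, 'create_cnt': create_cnt})
--
--     return answer
-- ===== SOURCE B (Python) =====
-- def solution(players, m, k):
--     answer = 0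
--     active = 0
--     expire = {}
--     for t, p in enumerate(players):
--         active -= expire.get(t, 0)
--         need = p // m
--         if active < need:
--             c = need - active
--             answer += c
--             active += c
--             expire[t + k] = c
--     return answer
-- ===== Notes on version B (the rewrite author's own statement) =====
-- stated objective: faster
-- what changed: Replaces the per-step server-list filtering and summing with a running active-capacity counter plus an expiry dictionary keyed by time, so each step is O(1) instead of rescanning all live servers.
import Mathlib
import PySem

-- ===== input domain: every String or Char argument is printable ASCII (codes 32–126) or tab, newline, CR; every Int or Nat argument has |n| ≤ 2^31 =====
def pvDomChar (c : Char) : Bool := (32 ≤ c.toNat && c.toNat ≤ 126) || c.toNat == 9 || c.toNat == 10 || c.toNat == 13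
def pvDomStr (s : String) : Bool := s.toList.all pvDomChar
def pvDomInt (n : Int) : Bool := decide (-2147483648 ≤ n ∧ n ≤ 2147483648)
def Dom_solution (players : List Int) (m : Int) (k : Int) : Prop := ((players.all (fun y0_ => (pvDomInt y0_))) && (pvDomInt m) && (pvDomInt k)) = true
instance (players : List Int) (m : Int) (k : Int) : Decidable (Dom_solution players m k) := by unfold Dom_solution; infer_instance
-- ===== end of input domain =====

-- B replaces A's per-step filtering and summing of a server-record list by a running
-- active-capacity counter plus an expiry dictionary keyed by time (O(1) per step).

-- ===== PORT A =====
-- Each Python server dict {'delete_time': d, 'create_cnt': c} is ported as the pair (d, c)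
-- (fixed string keys, record-like use: exact).
-- sum(s["create_cnt"] for s in servers)
def sumCnt (servers : List (Int × Int)) : Int := (servers.map (fun s => s.2)).sum

def solutionStep (m : Int) (k : Int) (st : Int × List (Int × Int)) (tp : Int × Int) :
    Int × List (Int × Int) :=
  let answer := st.1
  let time := tp.1
  let need_server := PySem.Int.floordiv tp.2 m
  let servers := st.2.filter (fun s => s.1 ≠ time)
  let use_server_cnt := sumCnt servers
  if use_server_cnt < need_server then
    (answer + (need_server - use_server_cnt),
     servers ++ [(time + k, need_server - use_server_cnt)])
  else
    (answer, servers)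

def solution (players : List Int) (m : Int) (k : Int) : Int :=
  ((PySem.List.enumerate players).foldl (solutionStep m k) (0, [])).1

-- ===== PORT B =====
def solutionAltStep (m : Int) (k : Int) (st : Int × Int × PySem.Dict Int Int)
    (tp : Int × Int) : Int × Int × PySem.Dict Int Int :=
  let answer := st.1
  let expire := st.2.2
  let active := st.2.1 - expire.getD tp.1 0
  let need := PySem.Int.floordiv tp.2 m
  if active < need then
    let c := need - active
    (answer + c, active + c, expire.insert (tp.1 + k) c)
  else
    (answer, active, expire)

def solution_alt (players : List Int) (m : Int) (k : Int) : Int :=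
  ((PySem.List.enumerate players).foldl (solutionAltStep m k) (0, 0, PySem.Dict.empty)).1

-- ===== PRECONDITION & SPEC =====
-- Pre_ excludes exactly the inputs where A raises ZeroDivisionError: m = 0 with at
-- least one player to process.
def Pre_solution (players : List Int) (m : Int) (k : Int) : Prop :=
  players = [] ∨ m ≠ 0

instance (players : List Int) (m : Int) (k : Int) : Decidable (Pre_solution players m k) := by
  unfold Pre_solution; infer_instance

def pvWitness_solution : List Int × Int × Int := ([6, 2, 5], 2, 2)

def Spec_solution (players : List Int) (m : Int) (k : Int) (out : Int) : Prop := out = solution_alt players m k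
instance (players : List Int) (m : Int) (k : Int) (out : Int) : Decidable (Spec_solution players m k out) := by unfold Spec_solution; infer_instance

-- ===== CLAIM (what is proved, stated in full; the proofs are below) =====
def Claim_equal_solution : Prop := ∀ (players : List Int) (m : Int) (k : Int), Dom_solution players m k → Pre_solution players m k → Spec_solution players m k (solution players m k)

-- ===== LEMMAS AND PROOFS =====

lemma sumCnt_append (a b : List (Int × Int)) : sumCnt (a ++ b) = sumCnt a + sumCnt b := by
  simp [sumCnt]

lemma sumCnt_filter_split (l : List (Int × Int)) (t : Int) :
    sumCnt l = sumCnt (l.filter (fun s => decide (s.1 = t))) +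
      sumCnt (l.filter (fun s => !decide (s.1 = t))) := by
  induction l with
  | nil => simp [sumCnt]
  | cons x xs ih =>
    by_cases hx : x.1 = t <;> simp [sumCnt, hx] at ih ⊢ <;> omega

lemma filter_ne_filter_eq (l : List (Int × Int)) (t u : Int) (h : u ≠ t) :
    (l.filter (fun s => !decide (s.1 = t))).filter (fun s => decide (s.1 = u)) =
      l.filter (fun s => decide (s.1 = u)) := by
  rw [List.filter_filter]
  apply List.filter_congr
  intro x _
  by_cases hx : x.1 = u
  · simp [hx, h]
  · simp [hx]

-- main induction lemma
lemma loop_eq (m k : Int) :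
    ∀ (l : List Int) (t answer active : Int) (servers : List (Int × Int))
      (expire : PySem.Dict Int Int),
      active = sumCnt servers →
      (∀ s ∈ servers, s.1 < t + k) →
      (∀ u : Int, t ≤ u → sumCnt (servers.filter (fun s => decide (s.1 = u))) = expire.getD u 0) →
      ((PySem.List.enumerate l t).foldl (solutionStep m k) (answer, servers)).1 =
      ((PySem.List.enumerate l t).foldl (solutionAltStep m k) (answer, active, expire)).1 := by
  intro l
  induction l with
  | nil => intro t answer active servers expire _ _ _; simp [PySem.List.enumerate_nil]
  | cons p l ih =>
    intro t answer active servers expire h1 h2 h3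
    rw [PySem.List.enumerate_cons]
    simp only [List.foldl_cons]
    have h3t := h3 t le_rfl
    have hsplit := sumCnt_filter_split servers t
    have huse : sumCnt (servers.filter (fun s => !decide (s.1 = t))) = active - expire.getD t 0 := by
      omega
    simp only [solutionStep, solutionAltStep, ne_eq, decide_not, huse]
    split_ifs with hc
    · apply ih
      · rw [sumCnt_append]
        have : sumCnt [((t : Int) + k, PySem.Int.floordiv p m - (active - expire.getD t 0))] =
            PySem.Int.floordiv p m - (active - expire.getD t 0) := by simp [sumCnt]
        omega
      · intro s hs
        rcases List.mem_append.mp hs with hs | hs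
        · have := h2 s (List.mem_of_mem_filter hs); omega
        · simp at hs
          rw [hs]
          show (t + k : Int) < t + 1 + k
          omega
      · intro u hu
        rw [List.filter_append, sumCnt_append, PySem.Dict.getD_insert]
        by_cases he : u = t + k
        · rw [if_pos he]
          subst he
          have hnil : (servers.filter (fun s => !decide (s.1 = t))).filter
              (fun s => decide (s.1 = t + k)) = [] := by
            rw [List.filter_eq_nil_iff]
            intro s hs
            have := h2 s (List.mem_of_mem_filter hs)
            simp
            omega
          rw [hnil]
          simp [sumCnt]
        · rw [if_neg he]
          have hnew : ([((t : Int) + k, PySem.Int.floordiv p m - (active - expire.getD t 0))].filter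
              (fun s => decide (s.1 = u))) = [] := by
            simp
            omega
          rw [hnew, filter_ne_filter_eq servers t u (by omega)]
          have := h3 u (by omega)
          simp [sumCnt] at *
          omega
    · apply ih
      · exact huse.symm
      · intro s hs
        have := h2 s (List.mem_of_mem_filter hs); omega
      · intro u hu
        rw [filter_ne_filter_eq servers t u (by omega)]
        exact h3 u (by omega)

-- ===== VERDICT (by name: the statement is the Claim_ definition above) =====
theorem solution_spec : Claim_equal_solution := by
  intro players m k _ _
  unfold Spec_solution solution solution_alt
  apply loop_eq m k players 0 0 0 [] PySem.Dict.empty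
  · simp [sumCnt]
  · simp
  · intro u _; simp [sumCnt, PySem.Dict.getD_empty]
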